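-- pv_equiv track=rewrite | github.com/Cornell-Genomics-Facility/phased_primers | app.py | _resolve_adapter
-- ===== SOURCE A (Python) =====
-- def _cg_violation_html(seq: str) -> str:
--     """Return an HTML error if 'CCCC' or any 5-long C/G-only run exists; else empty string."""
--     s = (seq or "").upper()
--     if ("AAAA" in s) or ("CCCC" in s) or ("TTTT" in s) or ("GGGG" in s):
--         return "<div style='color:#b00020'>❌ Bases cannot appear four times in a row (e.g., no “CCCC”).</div>"
--     for i in range(len(s) - 4):
--         if all(ch in {"C", "G"} for ch in s[i:i+5]):
--             return "<div style='color:#b00020'>❌ No 5-base runs composed only of C/G (e.g., “CGCGC”, “CCCGG”).</div>"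
--     return ""
--
-- def _resolve_adapter(adapter_choice: str, custom_value: str):
--     """
--     Validate adapter input:
--     - If 'Other (user entry)' is selected, allow ONLY A/C/T/G (case-insensitive).
--     - Enforce no 'CCCC' and no 5-long C/G-only runs.
--     - Convert to UPPERCASE on success.
--     """
--     if adapter_choice.startswith("Other"):
--         seq = ''.join((custom_value or "").split()).upper()
--         if not seq:
--             return None, "<div style='color:#b00020'>❌ Enter a custom adapter sequence.</div>"
--         invalid = sorted({ch for ch in seq if ch not in {"A", "C", "T", "G"}})
--         if invalid:
--             bad = ", ".join(invalid)
--             return None, f"<div style='color:#b00020'>❌ Invalid character(s): {bad}. Use only A, C, T, G.</div>"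
--         v = _cg_violation_html(seq)
--         if v:
--             return None, v
--         return seq, ""
--     # preset: take everything before first space; still enforce constraints
--     seq = adapter_choice.split(" ")[0].strip().upper()
--     v = _cg_violation_html(seq)
--     if v:
--         return None, v
--     return seq, ""
-- ===== SOURCE B (Python) =====
-- def _cg_violation_html(seq: str) -> str:
--     s = (seq or "").upper()
--     if ("AAAA" in s) or ("CCCC" in s) or ("TTTT" in s) or ("GGGG" in s):
--         return "<div style='color:#b00020'>❌ Bases cannot appear four times in a row (e.g., no “CCCC”).</div>"
--     run = 0
--     for ch in s:
--         run = run + 1 if (ch == "C" or ch == "G") else 0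
--         if run == 5:
--             return "<div style='color:#b00020'>❌ No 5-base runs composed only of C/G (e.g., “CGCGC”, “CCCGG”).</div>"
--     return ""
--
-- def _resolve_adapter(adapter_choice: str, custom_value: str):
--     if adapter_choice.startswith("Other"):
--         # drop whitespace character by character instead of join(split())
--         seq = ''.join(ch for ch in (custom_value or "") if not ch.isspace()).upper()
--         if not seq:
--             return None, "<div style='color:#b00020'>❌ Enter a custom adapter sequence.</div>"
--         invalid = sorted(set(seq) - set("ACTG"))
--         if invalid:
--             bad = ", ".join(invalid)
--             return None, f"<div style='color:#b00020'>❌ Invalid character(s): {bad}. Use only A, C, T, G.</div>"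
--     else:
--         # take the prefix before the first space with an explicit scan, not split(" ")[0]
--         head = []
--         for ch in adapter_choice:
--             if ch == ' ':
--                 break
--             head.append(ch)
--         seq = ''.join(head).strip().upper()
--     v = _cg_violation_html(seq)
--     return (None, v) if v else (seq, "")
-- ===== Notes on version B (the rewrite author's own statement) =====
-- stated objective: simpler
-- what changed: The C/G-run check scans once with an integer run-length counter instead of slicing a 5-character window at every index; whitespace is removed by a per-character filter instead of join(split()), the invalid-character set is computed by set difference instead of a filtering comprehension, the preset head is taken by an explicit scan-to-first-space instead of split(" ")[0], and the shared validation tail is factored into one place.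
import Mathlib
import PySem

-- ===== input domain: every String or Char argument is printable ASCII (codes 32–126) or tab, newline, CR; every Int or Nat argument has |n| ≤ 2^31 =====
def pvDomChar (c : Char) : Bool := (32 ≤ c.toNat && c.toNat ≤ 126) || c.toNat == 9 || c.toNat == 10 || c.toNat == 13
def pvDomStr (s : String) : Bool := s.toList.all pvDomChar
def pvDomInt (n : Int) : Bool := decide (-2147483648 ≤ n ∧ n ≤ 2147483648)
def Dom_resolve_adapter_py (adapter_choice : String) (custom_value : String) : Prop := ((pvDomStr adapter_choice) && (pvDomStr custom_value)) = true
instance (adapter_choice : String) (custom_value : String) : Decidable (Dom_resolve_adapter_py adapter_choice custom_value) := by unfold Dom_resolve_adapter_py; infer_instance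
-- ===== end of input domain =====

-- B replaces A's per-index window slicing in the C/G-run check by a single pass with a run-length
-- counter, removes whitespace with a per-character filter instead of join(split()), computes the
-- invalid characters by set difference instead of a filtering comprehension, takes the preset head
-- by an explicit scan-to-first-space instead of split(" ")[0], and factors the shared validation
-- tail out of both branches (objective: simpler).


-- shared string literals (the fixed messages of the Python module)
def pvErr4 : String := "<div style='color:#b00020'>❌ Bases cannot appear four times in a row (e.g., no “CCCC”).</div>"
def pvErr5 : String := "<div style='color:#b00020'>❌ No 5-base runs composed only of C/G (e.g., “CGCGC”, “CCCGG”).</div>"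
def pvErrEmpty : String := "<div style='color:#b00020'>❌ Enter a custom adapter sequence.</div>"

-- ===== PORT A =====
-- the 'for i in range(len(s)-4)' loop with its early return
def pvCgLoopA (s : List Char) : List Int → Bool
  | [] => false
  | i :: rest =>
      if (PySem.List.slice s (some i) (some (i + 5))).all (fun ch => ch == 'C' || ch == 'G') then true
      else pvCgLoopA s rest

def pvCgViolationA (seq : List Char) : String :=
  let s := PySem.Chars.upper seq
  if PySem.Chars.isIn "AAAA".toList s || PySem.Chars.isIn "CCCC".toList s ||
     PySem.Chars.isIn "TTTT".toList s || PySem.Chars.isIn "GGGG".toList s then pvErr4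
  else if pvCgLoopA s (PySem.List.pyRange 0 ((PySem.Chars.len s : Int) - 4) 1) then pvErr5
  else ""

def resolve_adapter_py (adapter_choice : String) (custom_value : String) : Option String × String :=
  if PySem.Chars.startswith adapter_choice.toList "Other".toList then
    let seq := PySem.Chars.upper (PySem.Chars.join [] (PySem.Chars.split₀ custom_value.toList))
    if seq = [] then (none, pvErrEmpty)
    else
      let invalid := PySem.List.sorted (PySem.Set.ofList (seq.filter (fun ch => !(['A', 'C', 'T', 'G'].contains ch)))) (fun x => x) false
      if invalid ≠ [] then
        let bad := PySem.Chars.join ", ".toList (invalid.map (fun c => [c]))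
        (none, String.ofList ("<div style='color:#b00020'>❌ Invalid character(s): ".toList ++ bad ++ ". Use only A, C, T, G.</div>".toList))
      else
        let v := pvCgViolationA seq
        if v ≠ "" then (none, v) else (some (String.ofList seq), "")
  else
    -- adapter_choice.split(" ") is never empty, so [0] is its head
    let seq := PySem.Chars.upper (PySem.Chars.strip ((PySem.Chars.splitOn adapter_choice.toList " ".toList).headD []))
    let v := pvCgViolationA seq
    if v ≠ "" then (none, v) else (some (String.ofList seq), "")

-- ===== PORT B =====
-- single pass keeping the length of the current run of C/G characters, early return at 5
def pvCgRunB (cs : List Char) (run : Nat) : Bool :=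
  match cs with
  | [] => false
  | c :: rest =>
      let run' := if c == 'C' || c == 'G' then run + 1 else 0
      if run' == 5 then true else pvCgRunB rest run'

def pvCgViolationB (seq : List Char) : String :=
  let s := PySem.Chars.upper seq
  if PySem.Chars.isIn "AAAA".toList s || PySem.Chars.isIn "CCCC".toList s ||
     PySem.Chars.isIn "TTTT".toList s || PySem.Chars.isIn "GGGG".toList s then pvErr4
  else if pvCgRunB s 0 then pvErr5
  else ""

-- the validation tail shared by both branches of B
def pvFinishB (seq : List Char) : Option String × String :=
  let v := pvCgViolationB seq
  if v ≠ "" then (none, v) else (some (String.ofList seq), "")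

-- the 'for ch in adapter_choice: if ch == " ": break; head.append(ch)' scan of B
def pvHeadB : List Char → List Char
  | [] => []
  | c :: rest => if c == ' ' then [] else c :: pvHeadB rest

def resolve_adapter_py_alt (adapter_choice : String) (custom_value : String) : Option String × String :=
  if PySem.Chars.startswith adapter_choice.toList "Other".toList then
    let seq := PySem.Chars.upper (custom_value.toList.filter (fun ch => !PySem.Chars.isspace ch))
    if seq = [] then (none, pvErrEmpty)
    else
      let invalid := PySem.List.sorted (PySem.Set.diff (PySem.Set.ofList seq) (PySem.Set.ofList "ACTG".toList)) (fun x => x) false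
      if invalid ≠ [] then
        let bad := PySem.Chars.join ", ".toList (invalid.map (fun c => [c]))
        (none, String.ofList ("<div style='color:#b00020'>❌ Invalid character(s): ".toList ++ bad ++ ". Use only A, C, T, G.</div>".toList))
      else pvFinishB seq
  else
    pvFinishB (PySem.Chars.upper (PySem.Chars.strip (pvHeadB adapter_choice.toList)))

-- ===== PRECONDITION & SPEC =====
def Spec_resolve_adapter_py (adapter_choice : String) (custom_value : String) (out : Option String × String) : Prop := out = resolve_adapter_py_alt adapter_choice custom_value
instance (adapter_choice : String) (custom_value : String) (out : Option String × String) : Decidable (Spec_resolve_adapter_py adapter_choice custom_value out) := by unfold Spec_resolve_adapter_py; infer_instance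

-- ===== CLAIM (what is proved, stated in full; the proofs are below) =====
def Claim_equal_resolve_adapter_py : Prop := ∀ (adapter_choice : String) (custom_value : String), Dom_resolve_adapter_py adapter_choice custom_value → Spec_resolve_adapter_py adapter_choice custom_value (resolve_adapter_py adapter_choice custom_value)

-- ===== LEMMAS AND PROOFS =====

-- the C/G test shared by both scans
def pvWinP : Char → Bool := fun c => c == 'C' || c == 'G'

-- "some length-5 window of s consists only of C/G"
def pvHasWin (s : List Char) : Prop := ∃ i, i + 5 ≤ s.length ∧ ((s.drop i).take 5).all pvWinP = true

lemma pvLoopA_eq_any (s : List Char) (l : List Int) :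
    pvCgLoopA s l = l.any (fun i => (PySem.List.slice s (some i) (some (i + 5))).all pvWinP) := by
  induction l with
  | nil => rfl
  | cons i rest ih =>
      show (if (PySem.List.slice s (some i) (some (i + 5))).all pvWinP then true else pvCgLoopA s rest) = _
      rw [List.any_cons, ih]
      cases h : (PySem.List.slice s (some i) (some (i + 5))).all pvWinP
      · simp
      · simp

lemma pvA_iff (s : List Char) :
    pvCgLoopA s (PySem.List.pyRange 0 ((PySem.Chars.len s : Int) - 4) 1) = true ↔ pvHasWin s := by
  rw [pvLoopA_eq_any, List.any_eq_true]
  constructor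
  · rintro ⟨x, hx, hall⟩
    rw [PySem.List.mem_pyRange_one] at hx
    obtain ⟨i, rfl⟩ : ∃ i : Nat, x = (i : Int) := ⟨x.toNat, by omega⟩
    refine ⟨i, by simp [PySem.Chars.len_eq] at hx; omega, ?_⟩
    have hs : PySem.List.slice s (some (i : Int)) (some ((i : Int) + 5)) = (s.drop i).take 5 := by
      simpa using PySem.List.slice_natCast_add s i 5
    rw [← hs]
    simpa [List.all_eq_true] using hall
  · rintro ⟨i, hi, hall⟩
    refine ⟨(i : Int), ?_, ?_⟩
    · rw [PySem.List.mem_pyRange_one]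
      constructor
      · omega
      · simp [PySem.Chars.len_eq]; omega
    · have hs : PySem.List.slice s (some (i : Int)) (some ((i : Int) + 5)) = (s.drop i).take 5 := by
        simpa using PySem.List.slice_natCast_add s i 5
      rw [hs]
      simpa [List.all_eq_true] using hall

lemma pvTakeWin (c : Char) (cs : List Char) :
    ((c :: cs).take 5).all pvWinP = (pvWinP c && (cs.take 4).all pvWinP) := by
  rfl

lemma pvB_iff (s : List Char) (n : Nat) (hn : n < 5) :
    pvCgRunB s n = true ↔
      (∃ m, m ≤ s.length ∧ 5 ≤ n + m ∧ (s.take m).all pvWinP = true) ∨ pvHasWin s := by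
  induction s generalizing n with
  | nil =>
      simp only [pvCgRunB, pvHasWin]
      constructor
      · intro h; cases h
      · rintro (⟨m, hm, h5, _⟩ | ⟨i, hi, _⟩)
        · simp at hm; omega
        · simp at hi
  | cons c cs ih =>
      have hrun : pvCgRunB (c :: cs) n =
          (let run' := if pvWinP c then n + 1 else 0
           if run' == 5 then true else pvCgRunB cs run') := rfl
      rw [hrun]
      by_cases hc : pvWinP c = true
      · simp only [hc, if_true]
        by_cases h5 : n + 1 = 5
        · rw [h5]
          simp only [BEq.rfl, if_true]
          constructor
          · intro _
            left
            refine ⟨1, by simp, by omega, ?_⟩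
            simp [hc]
          · intro _; trivial
        · have hlt : n + 1 < 5 := by omega
          rw [if_neg (by simp; omega)]
          rw [ih (n + 1) hlt]
          constructor
          · rintro (⟨m, hm, hm5, hall⟩ | hw)
            · left
              refine ⟨m + 1, by simpa using hm, by omega, ?_⟩
              simp [List.take_succ_cons, hall, hc]
            · right
              obtain ⟨i, hi, hall⟩ := hw
              exact ⟨i + 1, by simpa using hi, by simpa using hall⟩
          · rintro (⟨m, hm, hm5, hall⟩ | hw)
            · have hm1 : 1 ≤ m := by omega
              obtain ⟨m', rfl⟩ : ∃ m', m = m' + 1 := ⟨m - 1, by omega⟩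
              left
              refine ⟨m', by simpa using hm, by omega, ?_⟩
              simp only [List.take_succ_cons, List.all_cons, Bool.and_eq_true] at hall
              exact hall.2
            · obtain ⟨i, hi, hall⟩ := hw
              cases i with
              | zero =>
                  left
                  refine ⟨4, by simpa using hi, by omega, ?_⟩
                  simp only [List.drop_zero] at hall
                  rw [pvTakeWin, Bool.and_eq_true] at hall
                  exact hall.2
              | succ j =>
                  right
                  exact ⟨j, by simpa using hi, by simpa using hall⟩
      · have hc0 : pvWinP c = false := by simpa using hc
        simp only [hc0, Bool.false_eq_true, if_false]
        rw [if_neg (by simp)]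
        rw [ih 0 (by omega)]
        constructor
        · rintro (⟨m, hm, hm5, hall⟩ | hw)
          · right
            refine ⟨0 + 1, by simp; omega, ?_⟩
            simp only [List.drop_succ_cons, List.drop_zero]
            have heq : List.take 5 (List.take m cs) = List.take 5 cs := by
              rw [List.take_take]; congr 1; omega
            rw [List.all_eq_true] at hall ⊢
            intro x hx
            exact hall x (List.take_subset _ _ (heq ▸ hx))
          · obtain ⟨i, hi, hall⟩ := hw
            right
            exact ⟨i + 1, by simpa using hi, by simpa using hall⟩
        · rintro (⟨m, hm, hm5, hall⟩ | hw)
          · exfalso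
            have hm1 : 1 ≤ m := by omega
            obtain ⟨m', rfl⟩ : ∃ m', m = m' + 1 := ⟨m - 1, by omega⟩
            simp only [List.take_succ_cons, List.all_cons, Bool.and_eq_true] at hall
            rw [hall.1] at hc0
            cases hc0
          · obtain ⟨i, hi, hall⟩ := hw
            cases i with
            | zero =>
                exfalso
                simp only [List.drop_zero] at hall
                rw [pvTakeWin, Bool.and_eq_true] at hall
                rw [hall.1] at hc0
                cases hc0
            | succ j =>
                right
                exact ⟨j, by simpa using hi, by simpa using hall⟩

lemma pvB_zero_iff (s : List Char) : pvCgRunB s 0 = true ↔ pvHasWin s := by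
  rw [pvB_iff s 0 (by omega)]
  constructor
  · rintro (⟨m, hm, hm5, hall⟩ | hw)
    · refine ⟨0, by omega, ?_⟩
      simp only [List.drop_zero]
      have heq : List.take 5 (List.take m s) = List.take 5 s := by
        rw [List.take_take]; congr 1; omega
      rw [List.all_eq_true] at hall ⊢
      intro x hx
      exact hall x (List.take_subset _ _ (heq ▸ hx))
    · exact hw
  · intro hw; exact Or.inr hw

lemma pvCg_eq (seq : List Char) : pvCgViolationA seq = pvCgViolationB seq := by
  simp only [pvCgViolationA, pvCgViolationB]
  split_ifs with h4 hA hB hB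
  · rfl
  · rfl
  · exact absurd ((pvB_zero_iff _).2 ((pvA_iff _).1 hA)) hB
  · exact absurd ((pvA_iff _).2 ((pvB_zero_iff _).1 hB)) hA
  · rfl

lemma pvFinish_eq (seq : List Char) :
    (let v := pvCgViolationA seq
     if v ≠ "" then ((none : Option String), v) else (some (String.ofList seq), "")) = pvFinishB seq := by
  simp only [pvFinishB, pvCg_eq]

-- join with the empty separator is flatten
lemma pvFlattenIntersperseNil (xs : List (List Char)) :
    (xs.intersperse ([] : List Char)).flatten = xs.flatten := by
  induction xs with
  | nil => rfl
  | cons a t ih =>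
      cases t with
      | nil => rfl
      | cons b u =>
          rw [List.intersperse]
          · simp only [List.flatten_cons] at *
            simp [ih]
          · simp

lemma pvJoinNilSep (xs : List (List Char)) : PySem.Chars.join [] xs = xs.flatten := by
  simp only [PySem.Chars.join, List.intercalate]
  exact pvFlattenIntersperseNil xs

-- ''.join(s.split()) removes exactly the whitespace characters
lemma pvSplit0_go_flatten (s cur : List Char) (acc : List (List Char)) :
    (PySem.Chars.split₀.go s cur acc).flatten =
      acc.reverse.flatten ++ cur.reverse ++ s.filter (fun c => !PySem.Chars.isspace c) := by
  induction s generalizing cur acc with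
  | nil =>
      rw [PySem.Chars.split₀.go]
      by_cases h : cur.isEmpty = true
      · have : cur = [] := by simpa [List.isEmpty_iff] using h
        simp [h, this]
      · simp [h]
  | cons c rest ih =>
      rw [PySem.Chars.split₀.go]
      by_cases hsp : PySem.Chars.isspace c = true
      · by_cases h : cur.isEmpty = true
        · have hc : cur = [] := by simpa [List.isEmpty_iff] using h
          simp [hsp, h, ih, hc]
        · simp [hsp, h, ih]
      · have hsp' : PySem.Chars.isspace c = false := by simpa using hsp
        simp [hsp', ih, List.filter_cons]

lemma pvJoinSplit0 (s : List Char) :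
    PySem.Chars.join [] (PySem.Chars.split₀ s) = s.filter (fun c => !PySem.Chars.isspace c) := by
  rw [pvJoinNilSep, PySem.Chars.split₀, pvSplit0_go_flatten]
  simp

-- splitOn.go pushes finished pieces onto acc and reverses at the end
lemma pvSplitOnGo_acc (sep : List Char) (fuel : Nat) (l cur : List Char) (acc : List (List Char)) :
    PySem.Chars.splitOn.go sep fuel l cur acc =
      acc.reverse ++ PySem.Chars.splitOn.go sep fuel l cur [] := by
  induction fuel generalizing l cur acc with
  | zero => rw [PySem.Chars.splitOn.go, PySem.Chars.splitOn.go]; simp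
  | succ fuel ih =>
      cases l with
      | nil =>
          rw [PySem.Chars.splitOn.go, PySem.Chars.splitOn.go]
          · simp
          all_goals omega
      | cons c rest =>
          rw [PySem.Chars.splitOn.go, PySem.Chars.splitOn.go]
          by_cases h : sep.isPrefixOf (c :: rest) = true
          · simp only [h, if_true]
            rw [ih _ _ (cur.reverse :: acc), ih _ _ [cur.reverse]]
            simp
          · simp only [h]
            rw [if_neg (by simpa using h), if_neg (by simpa using h), ih _ _ acc]

-- head of split(" ") is the prefix before the first space (B's scan)
lemma pvSplitOnGo_head (fuel : Nat) (l cur : List Char) (h : l.length ≤ fuel) :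
    (PySem.Chars.splitOn.go [' '] fuel l cur []).headD [] = cur.reverse ++ pvHeadB l := by
  induction fuel generalizing l cur with
  | zero =>
      have : l = [] := by cases l <;> simp_all
      subst this
      rw [PySem.Chars.splitOn.go]
      simp [pvHeadB]
  | succ fuel ih =>
      cases l with
      | nil =>
          rw [PySem.Chars.splitOn.go]
          · simp [pvHeadB]
          all_goals omega
      | cons c rest =>
          rw [PySem.Chars.splitOn.go]
          by_cases hc : c = ' '
          · subst hc
            have hpre : List.isPrefixOf [' '] (' ' :: rest) = true := by
              simp [List.isPrefixOf]
            simp only [hpre, if_true]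
            rw [pvSplitOnGo_acc]
            simp [pvHeadB]
          · have hpre : List.isPrefixOf [' '] (c :: rest) = false := by
              simp [List.isPrefixOf]
              exact fun h => absurd h.symm hc
            simp only [hpre, Bool.false_eq_true, if_false]
            rw [ih rest (c :: cur) (by simpa using h)]
            simp [pvHeadB, hc]

lemma pvHead_eq (l : List Char) :
    (PySem.Chars.splitOn l " ".toList).headD [] = pvHeadB l := by
  have hsp : (" " : String).toList = [' '] := rfl
  rw [hsp, PySem.Chars.splitOn, pvSplitOnGo_head _ _ _ (by omega)]
  simp

-- sorted invalid characters: comprehension-set vs set difference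
lemma pvInvalid_eq (seq : List Char) :
    PySem.List.sorted (PySem.Set.ofList (seq.filter (fun ch => !(['A', 'C', 'T', 'G'].contains ch)))) (fun x => x) false
      = PySem.List.sorted (PySem.Set.diff (PySem.Set.ofList seq) (PySem.Set.ofList "ACTG".toList)) (fun x => x) false := by
  apply PySem.List.sorted_eq_sorted_of_perm _ _ _ (fun a b h => h)
  rw [List.perm_ext_iff_of_nodup (PySem.Set.nodup_ofList _)
        (PySem.Set.nodup_diff _ _ (PySem.Set.nodup_ofList _))]
  intro x
  rw [PySem.Set.mem_ofList, PySem.Set.mem_diff, PySem.Set.mem_ofList, List.mem_filter]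
  simp

-- ===== VERDICT (by name: the statement is the Claim_ definition above) =====
theorem resolve_adapter_py_spec : Claim_equal_resolve_adapter_py := by
  intro a c _
  unfold Spec_resolve_adapter_py resolve_adapter_py resolve_adapter_py_alt
  by_cases h : PySem.Chars.startswith a.toList "Other".toList = true
  · simp only [h, if_true, pvJoinSplit0, pvInvalid_eq]
    split
    · rfl
    · split
      · rfl
      · exact pvFinish_eq _
  · rw [if_neg h, if_neg h, pvHead_eq]
    exact pvFinish_eq _
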